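-- pv_equiv track=rewrite | github.com/kavigupta/all-congressional-representatives | export_representatives.py | split_cells
-- ===== SOURCE A (Python) =====
-- def split_cells(row_block: str) -> list[str]:
--     cells: list[str] = []
--     current: list[str] = []
--
--     def clean_line(line: str) -> str:
--         if line.startswith('!scope="row" |'):
--             return line.split("|", 1)[1].strip()
--         if line.startswith("|") and " |" in line[1:]:
--             return line.split(" |", 1)[1].strip()
--         if line.startswith("|"):
--             return line[1:].strip()
--         return line.strip()
--
--     for raw_line in row_block.splitlines():
--         line = raw_line.rstrip()
--         if not line:
--             continue
--         if line.startswith("!scope=\"row\"") or line.startswith("|"):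
--             if current:
--                 cells.append("\n".join(current).strip())
--             current = [clean_line(line)]
--         else:
--             if current:
--                 current.append(clean_line(line))
--
--     if current:
--         cells.append("\n".join(current).strip())
--
--     return cells
-- ===== SOURCE B (Python) =====
-- def split_cells(row_block: str) -> list[str]:
--     def clean_line(line: str) -> str:
--         if line.startswith('!scope="row" |'):
--             return line.split("|", 1)[1].strip()
--         if line.startswith("|") and " |" in line[1:]:
--             return line.split(" |", 1)[1].strip()
--         if line.startswith("|"):
--             return line[1:].strip()
--         return line.strip()
--
--     def is_boundary(line: str) -> bool:
--         return line.startswith('!scope="row"') or line.startswith("|")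
--
--     lines = [l for l in (r.rstrip() for r in row_block.splitlines()) if l]
--
--     # Consume the lines BACK-TO-FRONT: `tail` holds the cleaned continuation
--     # lines of the cell whose boundary line has not been reached yet; reaching
--     # a boundary line completes one whole cell, prepended to the result.
--     # Lines left in `tail` at the end preceded every boundary and are dropped.
--     cells: list[str] = []
--     tail: list[str] = []
--     for line in reversed(lines):
--         cleaned = clean_line(line)
--         if is_boundary(line):
--             cells = ["\n".join([cleaned] + tail).strip()] + cells
--             tail = []
--         else:
--             tail = [cleaned] + tail
--     return cells
-- ===== Notes on version B (the rewrite author's own statement) =====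
-- stated objective: alternative
-- what changed: B traverses the filtered lines back-to-front, completing one whole cell the moment a boundary line is reached (the non-boundary lines already passed form that cell's tail), instead of A's forward loop that cleans into a `current` buffer and flushes it when the NEXT boundary or end-of-input arrives; pre-boundary lines fall out naturally as the leftover tail.
import Mathlib
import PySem

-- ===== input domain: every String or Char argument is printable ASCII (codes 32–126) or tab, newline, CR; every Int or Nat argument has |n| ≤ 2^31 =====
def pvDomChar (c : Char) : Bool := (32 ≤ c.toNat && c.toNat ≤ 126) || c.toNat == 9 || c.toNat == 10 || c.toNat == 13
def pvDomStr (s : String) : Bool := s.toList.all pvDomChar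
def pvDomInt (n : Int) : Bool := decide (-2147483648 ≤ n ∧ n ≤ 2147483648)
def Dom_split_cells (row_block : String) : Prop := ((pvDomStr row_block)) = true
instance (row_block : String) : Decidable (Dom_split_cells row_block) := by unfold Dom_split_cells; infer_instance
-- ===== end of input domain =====

-- B walks the lines BACK-TO-FRONT, completing a whole cell each time a boundary line is
-- reached, instead of A's forward loop with a flush-on-next-boundary accumulator
-- (objective: alternative; same return value).

-- ===== PORT A =====
-- clean_line: the identical nested helper both Pythons define.
-- In the first two branches the split has ≥ 2 pieces (the separator occurs, given the
-- startswith/isIn guard), so the Python index [1] never raises; `.getD` is exact there.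
def cleanLine (line : String) : String :=
  if PySem.Str.startswith line "!scope=\"row\" |" then
    PySem.Str.strip (((PySem.Str.splitMax? line "|" 1).getD []).getD 1 "")
  else if PySem.Str.startswith line "|" && PySem.Str.isIn " |" (PySem.Str.slice line (some 1) none) then
    PySem.Str.strip (((PySem.Str.splitMax? line " |" 1).getD []).getD 1 "")
  else if PySem.Str.startswith line "|" then
    PySem.Str.strip (PySem.Str.slice line (some 1) none)
  else
    PySem.Str.strip line

def split_cells (row_block : String) : List String :=
  let st := (PySem.Str.splitlines row_block).foldl
    (fun (st : List String × List String) raw_line =>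
      let line := PySem.Str.rstrip raw_line
      if line = "" then st
      else if PySem.Str.startswith line "!scope=\"row\"" || PySem.Str.startswith line "|" then
        ((if st.2 ≠ [] then st.1 ++ [PySem.Str.strip (PySem.Str.join "\n" st.2)] else st.1),
         [cleanLine line])
      else if st.2 ≠ [] then (st.1, st.2 ++ [cleanLine line])
      else st)
    ([], [])
  if st.2 ≠ [] then st.1 ++ [PySem.Str.strip (PySem.Str.join "\n" st.2)] else st.1

-- ===== PORT B =====
def isBoundary (line : String) : Bool :=
  PySem.Str.startswith line "!scope=\"row\"" || PySem.Str.startswith line "|"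

def split_cells_alt (row_block : String) : List String :=
  let lines := ((PySem.Str.splitlines row_block).map PySem.Str.rstrip).filter (· ≠ "")
  (lines.reverse.foldl
    (fun (st : List String × List String) line =>
      let cleaned := cleanLine line
      if isBoundary line then
        (PySem.Str.strip (PySem.Str.join "\n" (cleaned :: st.2)) :: st.1, [])
      else (st.1, cleaned :: st.2))
    ([], [])).1

-- ===== PRECONDITION & SPEC =====
def Spec_split_cells (row_block : String) (out : List String) : Prop := out = split_cells_alt row_block
instance (row_block : String) (out : List String) : Decidable (Spec_split_cells row_block out) := by unfold Spec_split_cells; infer_instance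

-- ===== CLAIM (what is proved, stated in full; the proofs are below) =====
def Claim_equal_split_cells : Prop := ∀ (row_block : String), Dom_split_cells row_block → Spec_split_cells row_block (split_cells row_block)

-- ===== LEMMAS AND PROOFS =====

-- A's loop step (on an already rstripped, non-blank line) and its finisher
def stepA (st : List String × List String) (line : String) : List String × List String :=
  if isBoundary line then
    ((if st.2 ≠ [] then st.1 ++ [PySem.Str.strip (PySem.Str.join "\n" st.2)] else st.1),
     [cleanLine line])
  else if st.2 ≠ [] then (st.1, st.2 ++ [cleanLine line])
  else st

def finishA (st : List String × List String) : List String :=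
  if st.2 ≠ [] then st.1 ++ [PySem.Str.strip (PySem.Str.join "\n" st.2)] else st.1

-- B's loop step
def stepR (st : List String × List String) (line : String) : List String × List String :=
  if isBoundary line then
    (PySem.Str.strip (PySem.Str.join "\n" (cleanLine line :: st.2)) :: st.1, [])
  else (st.1, cleanLine line :: st.2)

-- B's fold expressed as a right fold (reversed-left-fold = foldr)
def goR (ls : List String) : List String × List String :=
  ls.foldr (fun l st => stepR st l) ([], [])

-- the cells produced from the remaining lines, given the current partial cell `cur`
def rest : List String → List String → List String
  | [], cur => if cur ≠ [] then [PySem.Str.strip (PySem.Str.join "\n" cur)] else []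
  | l :: ls, cur =>
    if isBoundary l then
      (if cur ≠ [] then [PySem.Str.strip (PySem.Str.join "\n" cur)] else []) ++ rest ls [cleanLine l]
    else if cur ≠ [] then rest ls (cur ++ [cleanLine l]) else rest ls []

theorem finish_foldl_stepA (lines : List String) :
    ∀ cs cur, finishA (lines.foldl stepA (cs, cur)) = cs ++ rest lines cur := by
  induction lines with
  | nil => intro cs cur; by_cases h : cur = [] <;> simp [finishA, rest, h]
  | cons l ls ih =>
    intro cs cur
    by_cases hb : isBoundary l = true
    · by_cases h : cur = [] <;>
        simp [stepA, rest, hb, h, ih, List.append_assoc]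
    · by_cases h : cur = [] <;>
        simp [stepA, rest, hb, h, ih]

theorem rest_goR (ls : List String) :
    (∀ cur, cur ≠ [] →
      rest ls cur = PySem.Str.strip (PySem.Str.join "\n" (cur ++ (goR ls).2)) :: (goR ls).1) ∧
    rest ls [] = (goR ls).1 := by
  induction ls with
  | nil =>
    constructor
    · intro cur h; simp [rest, goR, h]
    · simp [rest, goR]
  | cons l ls ih =>
    have hne : ([cleanLine l] : List String) ≠ [] := by simp
    by_cases hb : isBoundary l = true
    · constructor
      · intro cur h
        simp [rest, goR, stepR, hb, h, List.foldr_cons, (ih.1 [cleanLine l] hne)]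
      · simp [rest, goR, stepR, hb, List.foldr_cons, (ih.1 [cleanLine l] hne)]
    · constructor
      · intro cur h
        by_cases h2 : (goR ls).2 = []
        · simp [rest, goR, stepR, hb, h,
            ih.1 (cur ++ [cleanLine l]) (by simp), List.append_assoc]
        · simp [rest, goR, stepR, hb, h,
            ih.1 (cur ++ [cleanLine l]) (by simp), List.append_assoc]
      · simp [rest, goR, stepR, hb, ih.2]

-- ===== VERDICT (by name: the statement is the Claim_ definition above) =====
theorem split_cells_spec : Claim_equal_split_cells := by
  intro row_block _
  unfold Spec_split_cells split_cells split_cells_alt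
  -- A's raw loop = filter/map preprocessing followed by a fold of stepA
  have hstep : (fun (st : List String × List String) raw_line =>
      let line := PySem.Str.rstrip raw_line
      if line = "" then st
      else if PySem.Str.startswith line "!scope=\"row\"" || PySem.Str.startswith line "|" then
        ((if st.2 ≠ [] then st.1 ++ [PySem.Str.strip (PySem.Str.join "\n" st.2)] else st.1),
         [cleanLine line])
      else if st.2 ≠ [] then (st.1, st.2 ++ [cleanLine line])
      else st)
      = (fun st raw_line =>
          if (PySem.Str.rstrip raw_line ≠ "") then stepA st (PySem.Str.rstrip raw_line) else st) := by
    funext st raw_line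
    by_cases hb : PySem.Str.rstrip raw_line = "" <;> simp [hb, stepA, isBoundary]
  rw [hstep]
  have hfm : (PySem.Str.splitlines row_block).foldl
      (fun st raw_line =>
        if (PySem.Str.rstrip raw_line ≠ "") then stepA st (PySem.Str.rstrip raw_line) else st)
      ([], []) =
      (((PySem.Str.splitlines row_block).map PySem.Str.rstrip).filter (· ≠ "")).foldl
        stepA ([], []) := by
    rw [List.foldl_filter, List.foldl_map]
    congr 1
    funext x y
    by_cases hb : PySem.Str.rstrip y = "" <;> simp [hb]
  rw [hfm]
  set lines := ((PySem.Str.splitlines row_block).map PySem.Str.rstrip).filter (· ≠ "") with hl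
  have hA : finishA (lines.foldl stepA ([], [])) = rest lines [] := by
    simpa using finish_foldl_stepA lines [] []
  have hB : lines.reverse.foldl
      (fun (st : List String × List String) line =>
        let cleaned := cleanLine line
        if isBoundary line then
          (PySem.Str.strip (PySem.Str.join "\n" (cleaned :: st.2)) :: st.1, [])
        else (st.1, cleaned :: st.2))
      ([], []) = goR lines := by
    rw [List.foldl_reverse]
    simp [goR, stepR]
  show finishA (lines.foldl stepA ([], [])) =
    (lines.reverse.foldl
      (fun (st : List String × List String) line =>
        let cleaned := cleanLine line
        if isBoundary line then
          (PySem.Str.strip (PySem.Str.join "\n" (cleaned :: st.2)) :: st.1, [])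
        else (st.1, cleaned :: st.2))
      ([], [])).1
  rw [hA, (rest_goR lines).2, hB]
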